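-- pv_equiv track=rewrite | github.com/AndreyIh/Solved_from_chekio | Blizzard/short_string_conversion.py | steps_to_convert
-- ===== SOURCE A (Python) =====
-- def steps_to_convert(line1, line2):
--     ns = abs(len(line2)-len(line1))
--     maxl = ''
--
--     for i in range(0, len(line2)-1):
--         if line2[i] in line1:
--             for j in range(i+1, len(line2)+1):
--                 if line2[i: j] in line1:
--                     if len(line2[i: j]) > len(maxl):
--                         maxl = line2[i: j]
--                     else:
--                         break
--
--     return (max([len(line2), len(line1)]) - len(maxl))
-- ===== SOURCE B (Python) =====
-- def steps_to_convert(line1, line2):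
--     # Find the first position i (excluding the last index of line2) whose char
--     # occurs in line1, extend the match greedily from there, and return at once.
--     n = max(len(line1), len(line2))
--     for i in range(len(line2) - 1):
--         if line2[i] in line1:
--             L = 1
--             while i + L < len(line2) and line2[i:i + L + 1] in line1:
--                 L += 1
--             return n - L
--     return n
-- ===== Notes on version B (the rewrite author's own statement) =====
-- stated objective: faster
-- what changed: B scans for the first position of line2 whose character occurs in line1, extends that single match greedily and returns immediately, instead of A's nested loops that keep re-slicing and re-searching for every later start position (all of which only break at their first step once a match exists).
import Mathlib
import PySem

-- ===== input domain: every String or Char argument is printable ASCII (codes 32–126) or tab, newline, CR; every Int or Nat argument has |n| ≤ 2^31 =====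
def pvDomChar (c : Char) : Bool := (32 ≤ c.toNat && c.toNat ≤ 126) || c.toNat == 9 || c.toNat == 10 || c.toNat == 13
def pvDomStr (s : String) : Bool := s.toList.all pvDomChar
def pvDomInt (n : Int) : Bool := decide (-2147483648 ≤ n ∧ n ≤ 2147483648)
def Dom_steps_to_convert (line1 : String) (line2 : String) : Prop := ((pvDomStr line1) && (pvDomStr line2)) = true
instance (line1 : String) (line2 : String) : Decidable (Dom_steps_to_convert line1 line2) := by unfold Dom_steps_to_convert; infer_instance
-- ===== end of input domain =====

-- B differs from A: it returns at the FIRST matching start position (where A's later inner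
-- loops all break at their first step anyway) instead of scanning every remaining position.

-- ===== PORT A =====
-- inner loop 'for j in range(i+1, len(line2)+1)' of A; the 'break' is modeled by returning maxl
def stcInner (l1 l2 : List Char) (i : Int) (js : List Int) (maxl : List Char) : List Char :=
  match js with
  | [] => maxl
  | j :: js' =>
      let sub := PySem.List.slice l2 (some i) (some j)
      if PySem.Chars.isIn sub l1 then
        if sub.length > maxl.length then stcInner l1 l2 i js' sub
        else maxl
      else stcInner l1 l2 i js' maxl

-- outer loop 'for i in range(0, len(line2)-1)' of A
def stcOuter (l1 l2 : List Char) (is : List Int) (maxl : List Char) : List Char :=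
  match is with
  | [] => maxl
  | i :: is' =>
      stcOuter l1 l2 is'
        (match PySem.List.pyGet? l2 i with
         | some c =>
             if PySem.Chars.isIn [c] l1 then
               stcInner l1 l2 i (PySem.List.pyRange (i + 1) ((l2.length : Int) + 1) 1) maxl
             else maxl
         | none => maxl)

def steps_to_convert (line1 : String) (line2 : String) : Int :=
  let l1 := line1.toList
  let l2 := line2.toList
  let _ns : Int := ((l2.length : Int) - (l1.length : Int)).natAbs
  let maxl := stcOuter l1 l2 (PySem.List.pyRange 0 ((l2.length : Int) - 1) 1) []
  (match PySem.List.max? [(l2.length : Int), (l1.length : Int)] (fun y => y) with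
   | some m => m
   | none => 0) - (maxl.length : Int)

-- ===== PORT B =====
-- the while loop 'while i + L < len(line2) and line2[i:i+L+1] in line1: L += 1'
def altExtend (l1 l2 : List Char) (i L : Nat) : Nat :=
  if h : i + L < l2.length ∧
      PySem.Chars.isIn (PySem.List.slice l2 (some (i : Int)) (some ((i : Int) + (L : Int) + 1))) l1 = true
  then altExtend l1 l2 i (L + 1)
  else L
  termination_by l2.length - L
  decreasing_by omega

-- the for loop of B: scan for the first i with line2[i] in line1, return immediately
def altScan (l1 l2 : List Char) (n : Int) (i : Nat) : Int :=
  if h : i + 1 < l2.length then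
    if PySem.Chars.isIn [l2[i]'(by omega)] l1 then n - (altExtend l1 l2 i 1 : Int)
    else altScan l1 l2 n (i + 1)
  else n
  termination_by l2.length - i
  decreasing_by omega

def steps_to_convert_alt (line1 : String) (line2 : String) : Int :=
  let l1 := line1.toList
  let l2 := line2.toList
  altScan l1 l2 ((max l1.length l2.length : Nat) : Int) 0

-- ===== PRECONDITION & SPEC =====
def Spec_steps_to_convert (line1 : String) (line2 : String) (out : Int) : Prop := out = steps_to_convert_alt line1 line2
instance (line1 : String) (line2 : String) (out : Int) : Decidable (Spec_steps_to_convert line1 line2 out) := by unfold Spec_steps_to_convert; infer_instance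

-- ===== CLAIM (what is proved, stated in full; the proofs are below) =====
def Claim_equal_steps_to_convert : Prop := ∀ (line1 : String) (line2 : String), Dom_steps_to_convert line1 line2 → Spec_steps_to_convert line1 line2 (steps_to_convert line1 line2)

-- ===== LEMMAS AND PROOFS =====

-- monotonicity: if a shorter take is not an infix, no longer take is
theorem take_infix_mono {xs l1 : List Char} {j j' : Nat} (hle : j ≤ j')
    (h : xs.take j' <:+: l1) : xs.take j <:+: l1 := by
  have h1 : xs.take j = (xs.take j').take j := by
    rw [List.take_take, Nat.min_eq_left hle]
  rw [h1]
  exact List.IsInfix.trans (List.take_prefix j (xs.take j')).isInfix h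

-- if no slice starting at i over the remaining js is in l1, the inner loop returns maxl
theorem stcInner_const (l1 l2 : List Char) (i : Int) (js : List Int) (maxl : List Char)
    (h : ∀ j ∈ js, PySem.Chars.isIn (PySem.List.slice l2 (some i) (some j)) l1 = false) :
    stcInner l1 l2 i js maxl = maxl := by
  induction js with
  | nil => rfl
  | cons j js' ih =>
      have hj := h j (List.mem_cons_self ..)
      simp only [stcInner, hj, Bool.false_eq_true, if_false]
      exact ih (fun j hj => h j (List.mem_cons_of_mem _ hj))

theorem slice_nat (l2 : List Char) (a b : Nat) :
    PySem.List.slice l2 (some (a : Int)) (some (b : Int)) = (l2.drop a).take (b - a) :=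
  PySem.List.slice_natCast ..

-- altExtend never extends past the end of l2
theorem altExtend_le (l1 l2 : List Char) (i L : Nat) (h : i + L ≤ l2.length) :
    i + altExtend l1 l2 i L ≤ l2.length := by
  unfold altExtend
  split
  · next hc => exact altExtend_le l1 l2 i (L + 1) (by omega)
  · exact h
  termination_by l2.length - L
  decreasing_by omega

-- altExtend only ever increases L
theorem altExtend_ge (l1 l2 : List Char) (i L : Nat) : L ≤ altExtend l1 l2 i L := by
  unfold altExtend
  split
  · next hc =>
      have := altExtend_ge l1 l2 i (L + 1)
      omega
  · omega
  termination_by l2.length - L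
  decreasing_by omega

-- the inner loop of A, entered with maxl = the current greedy match of length L ≥ 1,
-- computes exactly B's greedy extension
theorem stcInner_ext (l1 l2 : List Char) (i L : Nat) (hL : 1 ≤ L) (hiL : i + L ≤ l2.length)
    (_hin : PySem.Chars.isIn ((l2.drop i).take L) l1 = true) :
    stcInner l1 l2 (i : Int) (PySem.List.pyRange ((i : Int) + L + 1) ((l2.length : Int) + 1) 1)
        ((l2.drop i).take L)
      = (l2.drop i).take (altExtend l1 l2 i L) := by
  by_cases hend : i + L < l2.length
  · have hcons : PySem.List.pyRange ((i : Int) + L + 1) ((l2.length : Int) + 1) 1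
        = ((i : Int) + L + 1) :: PySem.List.pyRange ((i : Int) + L + 1 + 1) ((l2.length : Int) + 1) 1 :=
      PySem.List.pyRange_one_cons (by omega)
    have hslice : PySem.List.slice l2 (some (i : Int)) (some ((i : Int) + L + 1))
        = (l2.drop i).take (L + 1) := by
      have : ((i : Int) + L + 1) = ((i + (L + 1) : Nat) : Int) := by push_cast; ring
      rw [this, slice_nat]
      congr 1
      omega
    have hlen1 : ((l2.drop i).take (L + 1)).length = L + 1 := by
      simp [List.length_take, List.length_drop]; omega
    have hlen0 : ((l2.drop i).take L).length = L := by
      simp [List.length_take, List.length_drop]; omega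
    by_cases hin2 : PySem.Chars.isIn ((l2.drop i).take (L + 1)) l1 = true
    · -- extend: recurse on both sides
      rw [hcons]
      simp only [stcInner, hslice, hin2, if_pos, hlen1, hlen0]
      rw [if_pos (by omega)]
      have hrec : ((i : Int) + L + 1 + 1) = ((i : Int) + (L + 1 : Nat) + 1) := by push_cast; ring
      rw [hrec, stcInner_ext l1 l2 i (L + 1) (by omega) (by omega) hin2]
      conv_rhs => rw [altExtend]
      rw [dif_pos]
      refine ⟨hend, ?_⟩
      rw [hslice]; exact hin2
    · -- stop: A's inner loop sees no further match; B's while stops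
      rw [hcons]
      have hin2' : PySem.Chars.isIn ((l2.drop i).take (L + 1)) l1 = false := by
        cases hx : PySem.Chars.isIn ((l2.drop i).take (L + 1)) l1
        · rfl
        · exact absurd hx hin2
      simp only [stcInner, hslice, hin2', Bool.false_eq_true, if_false]
      rw [stcInner_const]
      · conv_rhs => rw [altExtend]
        rw [dif_neg]
        intro hc
        rw [hslice] at hc
        exact hin2 hc.2
      · intro j hj
        have hjmem := (PySem.List.mem_pyRange_one.mp hj)
        have hj0 : 0 ≤ j := by omega
        have hsl : PySem.List.slice l2 (some (i : Int)) (some j) = (l2.drop i).take (j.toNat - i) := by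
          conv_lhs => rw [show j = ((j.toNat : Nat) : Int) by omega]
          rw [slice_nat]
        rw [hsl]
        have hnot : ¬ ((l2.drop i).take (L + 1) <:+: l1) := by
          intro hc
          exact hin2 ((PySem.Chars.isIn_iff_infix _ _).mpr hc)
        apply (PySem.Chars.isIn_eq_false_iff _ _).mpr
        intro hc
        exact hnot (take_infix_mono (by omega) hc)
  · -- i + L = len(l2): the range is empty and B's while stops
    have hnil : PySem.List.pyRange ((i : Int) + L + 1) ((l2.length : Int) + 1) 1 = [] :=
      PySem.List.pyRange_one_eq_nil (by omega)
    rw [hnil]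
    conv_rhs => rw [altExtend]
    rw [dif_neg (by intro hc; omega)]
    rfl
  termination_by l2.length - L
  decreasing_by omega

-- once maxl is nonempty, every inner loop breaks at its first step
theorem stcInner_break (l1 l2 : List Char) (i : Nat) (maxl : List Char) (hi : i < l2.length)
    (hch : PySem.Chars.isIn [l2[i]] l1 = true) (hne : maxl ≠ []) :
    stcInner l1 l2 (i : Int) (PySem.List.pyRange ((i : Int) + 1) ((l2.length : Int) + 1) 1) maxl
      = maxl := by
  have hcons : PySem.List.pyRange ((i : Int) + 1) ((l2.length : Int) + 1) 1
      = ((i : Int) + 1) :: PySem.List.pyRange ((i : Int) + 1 + 1) ((l2.length : Int) + 1) 1 :=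
    PySem.List.pyRange_one_cons (by omega)
  have hslice : PySem.List.slice l2 (some (i : Int)) (some ((i : Int) + 1)) = [l2[i]] := by
    have : ((i : Int) + 1) = ((i + 1 : Nat) : Int) := by push_cast; ring
    rw [this, slice_nat]
    have h1 : i + 1 - i = 1 := by omega
    rw [h1, List.take_one, List.head?_drop]
    simp [List.getElem?_eq_getElem hi]
  have hlen : 0 < maxl.length := List.length_pos_iff.mpr hne
  rw [hcons]
  simp only [stcInner, hslice, hch, if_pos, List.length_singleton]
  rw [if_neg (by omega)]

-- once maxl is nonempty the whole remaining outer loop is constant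
theorem stcOuter_const (l1 l2 : List Char) (maxl : List Char) (hne : maxl ≠ []) (a : Nat) :
    stcOuter l1 l2 (PySem.List.pyRange (a : Int) ((l2.length : Int) - 1) 1) maxl = maxl := by
  by_cases hlt : a + 1 < l2.length
  · have hcons : PySem.List.pyRange (a : Int) ((l2.length : Int) - 1) 1
        = (a : Int) :: PySem.List.pyRange ((a : Int) + 1) ((l2.length : Int) - 1) 1 :=
      PySem.List.pyRange_one_cons (by omega)
    rw [hcons]
    have ha : a < l2.length := by omega
    have hget : PySem.List.pyGet? l2 (a : Int) = some (l2[a]) := by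
      rw [PySem.List.pyGet?_natCast]
      simp [List.getElem?_eq_getElem ha]
    simp only [stcOuter, hget]
    have hstep : (if PySem.Chars.isIn [l2[a]] l1 then
        stcInner l1 l2 (a : Int) (PySem.List.pyRange ((a : Int) + 1) ((l2.length : Int) + 1) 1) maxl
        else maxl) = maxl := by
      split
      · next hch => exact stcInner_break l1 l2 a maxl ha hch hne
      · rfl
    rw [hstep]
    have : ((a : Int) + 1) = ((a + 1 : Nat) : Int) := by push_cast; ring
    rw [this]
    exact stcOuter_const l1 l2 maxl hne (a + 1)
  · have hnil : PySem.List.pyRange (a : Int) ((l2.length : Int) - 1) 1 = [] :=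
      PySem.List.pyRange_one_eq_nil (by omega)
    rw [hnil]; rfl
  termination_by l2.length - a
  decreasing_by omega

-- the main alignment: A's outer loop from position a with maxl = [] against B's scan
theorem scan_eq (l1 l2 : List Char) (n : Int) (a : Nat) :
    altScan l1 l2 n a
      = n - ((stcOuter l1 l2 (PySem.List.pyRange (a : Int) ((l2.length : Int) - 1) 1) []).length : Int) := by
  by_cases hlt : a + 1 < l2.length
  · have ha : a < l2.length := by omega
    have hcons : PySem.List.pyRange (a : Int) ((l2.length : Int) - 1) 1
        = (a : Int) :: PySem.List.pyRange ((a : Int) + 1) ((l2.length : Int) - 1) 1 :=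
      PySem.List.pyRange_one_cons (by omega)
    have hget : PySem.List.pyGet? l2 (a : Int) = some (l2[a]) := by
      rw [PySem.List.pyGet?_natCast]
      simp [List.getElem?_eq_getElem ha]
    rw [hcons]
    simp only [stcOuter, hget]
    by_cases hch : PySem.Chars.isIn [l2[a]] l1 = true
    · -- first match: A computes the greedy extension here and keeps it to the end
      have hsingle : PySem.List.slice l2 (some (a : Int)) (some ((a : Int) + 1)) = [l2[a]] := by
        have : ((a : Int) + 1) = ((a + 1 : Nat) : Int) := by push_cast; ring
        rw [this, slice_nat]
        have h1 : a + 1 - a = 1 := by omega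
        rw [h1, List.take_one, List.head?_drop]
        simp [List.getElem?_eq_getElem ha]
      have htake1 : (l2.drop a).take 1 = [l2[a]] := by
        rw [List.take_one, List.head?_drop]
        simp [List.getElem?_eq_getElem ha]
      have hfirst : stcInner l1 l2 (a : Int)
          (PySem.List.pyRange ((a : Int) + 1) ((l2.length : Int) + 1) 1) []
          = (l2.drop a).take (altExtend l1 l2 a 1) := by
        have hcons2 : PySem.List.pyRange ((a : Int) + 1) ((l2.length : Int) + 1) 1
            = ((a : Int) + 1) :: PySem.List.pyRange ((a : Int) + 1 + 1) ((l2.length : Int) + 1) 1 :=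
          PySem.List.pyRange_one_cons (by omega)
        rw [hcons2]
        simp only [stcInner, hsingle, hch, if_pos, List.length_singleton, List.length_nil]
        rw [if_pos (by omega)]
        have hrw : ((a : Int) + 1 + 1) = ((a : Int) + (1 : Nat) + 1) := by push_cast; ring
        have hin1 : PySem.Chars.isIn ((l2.drop a).take 1) l1 = true := by rw [htake1]; exact hch
        rw [hrw, ← htake1, stcInner_ext l1 l2 a 1 (by omega) (by omega) hin1]
      rw [if_pos hch, hfirst]
      have hE1 : 1 ≤ altExtend l1 l2 a 1 := altExtend_ge l1 l2 a 1
      have hEle : a + altExtend l1 l2 a 1 ≤ l2.length := altExtend_le l1 l2 a 1 (by omega)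
      have hne : (l2.drop a).take (altExtend l1 l2 a 1) ≠ [] := by
        intro hc
        have := congrArg List.length hc
        simp [List.length_take, List.length_drop] at this
        omega
      have hrest : ((a : Int) + 1) = ((a + 1 : Nat) : Int) := by push_cast; ring
      rw [hrest, stcOuter_const l1 l2 _ hne (a + 1)]
      have hlen : ((l2.drop a).take (altExtend l1 l2 a 1)).length = altExtend l1 l2 a 1 := by
        simp [List.length_take, List.length_drop]; omega
      rw [hlen]
      conv_lhs => rw [altScan]
      rw [dif_pos hlt, if_pos hch]
    · -- no match at a: both sides move on
      have hch' : PySem.Chars.isIn [l2[a]] l1 = false := by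
        cases hx : PySem.Chars.isIn [l2[a]] l1
        · rfl
        · exact absurd hx hch
      rw [if_neg (by simp [hch'])]
      conv_lhs => rw [altScan]
      rw [dif_pos hlt, if_neg (by simp [hch'])]
      have : ((a : Int) + 1) = ((a + 1 : Nat) : Int) := by push_cast; ring
      rw [this]
      exact scan_eq l1 l2 n (a + 1)
  · have hnil : PySem.List.pyRange (a : Int) ((l2.length : Int) - 1) 1 = [] :=
      PySem.List.pyRange_one_eq_nil (by omega)
    rw [hnil]
    conv_lhs => rw [altScan]
    rw [dif_neg hlt]
    simp [stcOuter]
  termination_by l2.length - a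
  decreasing_by omega

-- ===== VERDICT (by name: the statement is the Claim_ definition above) =====
theorem steps_to_convert_spec : Claim_equal_steps_to_convert := by
  intro line1 line2 _hdom
  unfold Spec_steps_to_convert steps_to_convert steps_to_convert_alt
  simp only [PySem.List.max?_id_cons, List.foldl]
  rw [scan_eq line1.toList line2.toList _ 0]
  have hr : ((0 : Nat) : Int) = (0 : Int) := by norm_num
  rw [hr]
  push_cast [Nat.cast_max]
  rw [max_comm ((line2.toList.length : Int)) ((line1.toList.length : Int))]
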